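-- pv_equiv track=rewrite | github.com/AnisimovMike/OnlineIntelligentAssistant | Routing/routing.py | find_existing_paths
-- ===== SOURCE A (Python) =====
-- def find_existing_paths(new_point, existing_paths):
--     start_list = [cur_path[0] for cur_path in existing_paths]
--     end_list = [cur_path[1] for cur_path in existing_paths]
--     if (new_point[1] in start_list) and (new_point[0] in end_list):
--         cur_start_index = end_list.index(new_point[0])
--         cur_end_index = start_list.index(new_point[1])
--         existing_paths[cur_start_index] = (existing_paths[cur_start_index][0], existing_paths[cur_end_index][1])
--         del existing_paths[cur_end_index]
--     elif (new_point[1] in start_list) and (new_point[0] not in end_list):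
--         cur_index = start_list.index(new_point[1])
--         existing_paths[cur_index] = (new_point[0], end_list[cur_index])
--     elif (new_point[1] not in start_list) and (new_point[0] in end_list):
--         cur_index = end_list.index(new_point[0])
--         existing_paths[cur_index] = (start_list[cur_index], new_point[1])
--     else:
--         existing_paths.append((new_point[0], new_point[1]))
--     return existing_paths
-- ===== SOURCE B (Python) =====
-- def find_existing_paths(new_point, existing_paths):
--     # Functional rebuild: instead of projecting start/end lists and doing
--     # index-based in-place surgery (set / del), stream over the paths once,
--     # emitting 0 or 1 output elements per input element.  A path is rewritten
--     # at the moment it is encountered; the merged-away partner is simply not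
--     # emitted.  Two lookahead values (first path starting at new_point[1],
--     # whether any path ends at new_point[0]) drive the per-element decision.
--     a, b = new_point
--     startv = next((p for p in existing_paths if p[0] == b), None)
--     endv = next((p for p in existing_paths if p[1] == a), None)
--     out = []
--     done_e = done_s = False
--     for p in existing_paths:
--         if not done_e and p[1] == a:
--             done_e = True
--             if startv is None:
--                 out.append((p[0], b))          # extend this path forward by b
--             elif not done_s and p[0] == b:
--                 done_s = True                  # p is both partners: it closes on itself, drop it
--             else:
--                 out.append((p[0], startv[1]))  # glue: this path now runs to startv's end
--         elif not done_s and p[0] == b and endv is not None: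
--             done_s = True                      # merged into the end-match; drop
--         elif not done_s and p[0] == b:
--             done_s = True
--             out.append((a, p[1]))              # extend this path backward by a
--         else:
--             out.append(p)
--     if startv is None and endv is None:
--         out.append((a, b))                     # brand new path
--     existing_paths[:] = out                    # preserve A's in-place mutation
--     return existing_paths
-- ===== Notes on version B (the rewrite author's own statement) =====
-- stated objective: alternative
-- what changed: B abandons A's projection lists and index-based in-place surgery (set/del by .index) for a functional rebuild: one streaming pass that emits 0 or 1 output elements per input path (dropping the merged-away partner, rewriting a matched path as it is encountered), driven by two precomputed lookahead values.
import Mathlib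
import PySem

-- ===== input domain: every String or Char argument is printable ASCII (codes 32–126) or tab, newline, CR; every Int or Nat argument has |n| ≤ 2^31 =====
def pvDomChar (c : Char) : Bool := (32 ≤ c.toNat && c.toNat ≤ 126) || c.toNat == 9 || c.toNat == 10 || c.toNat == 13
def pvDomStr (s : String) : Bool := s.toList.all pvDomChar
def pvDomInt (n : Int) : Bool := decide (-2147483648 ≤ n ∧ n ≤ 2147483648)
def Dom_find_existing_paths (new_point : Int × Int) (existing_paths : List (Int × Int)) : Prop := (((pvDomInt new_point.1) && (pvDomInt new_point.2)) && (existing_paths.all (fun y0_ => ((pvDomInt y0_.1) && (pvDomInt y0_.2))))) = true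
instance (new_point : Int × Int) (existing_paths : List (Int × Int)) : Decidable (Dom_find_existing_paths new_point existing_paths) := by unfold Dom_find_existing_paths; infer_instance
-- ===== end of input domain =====

-- B replaces A's projection lists + index-based in-place surgery (set / del) by a functional
-- rebuild: one streaming pass emitting 0 or 1 output elements per input element, driven by two
-- lookahead values; return value only (the Python B mutates existing_paths[:] like A). Objective: alternative.


-- ===== PORT A =====
def find_existing_paths (new_point : Int × Int) (existing_paths : List (Int × Int)) : List (Int × Int) :=
  let start_list := existing_paths.map Prod.fst
  let end_list := existing_paths.map Prod.snd
  if new_point.2 ∈ start_list ∧ new_point.1 ∈ end_list then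
    -- .index is safe here (membership just checked), so getD never sees none
    let cur_start_index := (PySem.List.index? end_list new_point.1).getD 0
    let cur_end_index := (PySem.List.index? start_list new_point.2).getD 0
    (existing_paths.set cur_start_index
        ((existing_paths.getD cur_start_index (0, 0)).1,
         (existing_paths.getD cur_end_index (0, 0)).2)).eraseIdx cur_end_index
  else if new_point.2 ∈ start_list ∧ new_point.1 ∉ end_list then
    let cur_index := (PySem.List.index? start_list new_point.2).getD 0
    existing_paths.set cur_index (new_point.1, end_list.getD cur_index 0)
  else if new_point.2 ∉ start_list ∧ new_point.1 ∈ end_list then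
    let cur_index := (PySem.List.index? end_list new_point.1).getD 0
    existing_paths.set cur_index (start_list.getD cur_index 0, new_point.2)
  else
    existing_paths ++ [(new_point.1, new_point.2)]

-- ===== PORT B =====
-- the rebuild loop of Source B: walks the paths once with the two done-flags, emitting 0/1
-- elements per input element; startv/endv are the precomputed lookahead values
def fep_go (a b : Int) (startv endv : Option (Int × Int)) :
    Bool → Bool → List (Int × Int) → List (Int × Int)
  | _, _, [] => []
  | dE, dS, p :: rest =>
    if ¬dE = true ∧ p.2 = a then
      match startv with
      | none => (p.1, b) :: fep_go a b startv endv true dS rest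
      | some sv =>
        if ¬dS = true ∧ p.1 = b then fep_go a b startv endv true true rest
        else (p.1, sv.2) :: fep_go a b startv endv true dS rest
    else if ¬dS = true ∧ p.1 = b ∧ endv.isSome then fep_go a b startv endv dE true rest
    else if ¬dS = true ∧ p.1 = b then (a, p.2) :: fep_go a b startv endv dE true rest
    else p :: fep_go a b startv endv dE dS rest

def find_existing_paths_alt (new_point : Int × Int) (existing_paths : List (Int × Int)) : List (Int × Int) :=
  let a := new_point.1
  let b := new_point.2
  let startv := existing_paths.find? (fun p => p.1 == b)
  let endv := existing_paths.find? (fun p => p.2 == a)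
  let out := fep_go a b startv endv false false existing_paths
  if startv = none ∧ endv = none then out ++ [(a, b)] else out

-- ===== PRECONDITION & SPEC =====
def Spec_find_existing_paths (new_point : Int × Int) (existing_paths : List (Int × Int)) (out : List (Int × Int)) : Prop := out = find_existing_paths_alt new_point existing_paths
instance (new_point : Int × Int) (existing_paths : List (Int × Int)) (out : List (Int × Int)) : Decidable (Spec_find_existing_paths new_point existing_paths out) := by unfold Spec_find_existing_paths; infer_instance

-- ===== CLAIM (what is proved, stated in full; the proofs are below) =====
def Claim_equal_find_existing_paths : Prop := ∀ (new_point : Int × Int) (existing_paths : List (Int × Int)), Dom_find_existing_paths new_point existing_paths → Spec_find_existing_paths new_point existing_paths (find_existing_paths new_point existing_paths)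

-- ===== LEMMAS AND PROOFS =====

-- bridges between A's projection-list primitives and findIdx? on the pair list
theorem idxOf?_snd (v : Int) (l : List (Int × Int)) :
    List.idxOf? v (l.map Prod.snd) = l.findIdx? (fun p => p.2 == v) := by
  rw [List.idxOf?, List.findIdx?_map]; rfl

theorem idxOf?_fst (v : Int) (l : List (Int × Int)) :
    List.idxOf? v (l.map Prod.fst) = l.findIdx? (fun p => p.1 == v) := by
  rw [List.idxOf?, List.findIdx?_map]; rfl

theorem index?_snd (v : Int) (l : List (Int × Int)) :
    PySem.List.index? (l.map Prod.snd) v = l.findIdx? (fun p => p.2 == v) := by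
  rw [PySem.List.index?_eq_idxOf?, idxOf?_snd]

theorem index?_fst (v : Int) (l : List (Int × Int)) :
    PySem.List.index? (l.map Prod.fst) v = l.findIdx? (fun p => p.1 == v) := by
  rw [PySem.List.index?_eq_idxOf?, idxOf?_fst]

theorem mem_snd_iff (v : Int) (l : List (Int × Int)) :
    v ∈ l.map Prod.snd ↔ (l.findIdx? (fun p => p.2 == v)).isSome := by
  rw [← index?_snd, ← PySem.List.index?_isSome_iff]

theorem mem_fst_iff (v : Int) (l : List (Int × Int)) :
    v ∈ l.map Prod.fst ↔ (l.findIdx? (fun p => p.1 == v)).isSome := by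
  rw [← index?_fst, ← PySem.List.index?_isSome_iff]

theorem getElem?_map_fst (l : List (Int × Int)) (i : Nat) :
    (Option.map Prod.fst l[i]?).getD 0 = (l[i]?.getD (0, 0)).1 := by
  cases l[i]? <;> simp

theorem getElem?_map_snd (l : List (Int × Int)) (i : Nat) :
    (Option.map Prod.snd l[i]?).getD 0 = (l[i]?.getD (0, 0)).2 := by
  cases l[i]? <;> simp

-- find? yields the element findIdx? points at
theorem find?_at_findIdx? (q : (Int × Int) → Bool) (l : List (Int × Int)) :
    ∀ (i : Nat), l.findIdx? q = some i → ∃ v, l.find? q = some v ∧ l[i]? = some v := by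
  induction l with
  | nil => intro i h; simp at h
  | cons p rest ih =>
    intro i h
    by_cases hq : q p = true
    · have : i = 0 := by simp [List.findIdx?_cons, hq] at h; omega
      subst this
      exact ⟨p, by simp [List.find?_cons, hq], by simp⟩
    · obtain ⟨i', hi', rfl⟩ : ∃ i', rest.findIdx? q = some i' ∧ i = i' + 1 := by
        simp [List.findIdx?_cons, hq] at h
        rcases h with ⟨k, hk, rfl⟩; exact ⟨k, hk, rfl⟩
      obtain ⟨v, hv1, hv2⟩ := ih i' hi'
      exact ⟨v, by simp [List.find?_cons, hq, hv1], by simpa using hv2⟩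

theorem find?_none_of_findIdx?_none (q : (Int × Int) → Bool) (l : List (Int × Int))
    (h : l.findIdx? q = none) : l.find? q = none := by
  rw [List.find?_eq_none]
  intro x hx
  simpa using List.findIdx?_eq_none_iff.mp h x hx

theorem no_end_of_none (a : Int) (l : List (Int × Int))
    (h : l.findIdx? (fun p => p.2 == a) = none) : ∀ p ∈ l, ¬ p.2 = a := by
  intro p hp
  simpa using List.findIdx?_eq_none_iff.mp h p hp

theorem no_start_of_none (b : Int) (l : List (Int × Int))
    (h : l.findIdx? (fun p => p.1 == b) = none) : ∀ p ∈ l, ¬ p.1 = b := by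
  intro p hp
  simpa using List.findIdx?_eq_none_iff.mp h p hp

-- the rebuild loop is the identity once each rewrite is done or impossible
theorem fep_go_id (a b : Int) (sv? ev? : Option (Int × Int)) :
    ∀ (l : List (Int × Int)) (dE dS : Bool),
      (dE = true ∨ ∀ p ∈ l, ¬ p.2 = a) → (dS = true ∨ ∀ p ∈ l, ¬ p.1 = b) →
      fep_go a b sv? ev? dE dS l = l := by
  intro l
  induction l with
  | nil => intro dE dS _ _; rfl
  | cons p rest ih =>
    intro dE dS hE hS
    have hErest : dE = true ∨ ∀ q ∈ rest, ¬ q.2 = a := by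
      rcases hE with h | h; · exact Or.inl h
      · exact Or.inr fun q hq => h q (by simp [hq])
    have hSrest : dS = true ∨ ∀ q ∈ rest, ¬ q.1 = b := by
      rcases hS with h | h; · exact Or.inl h
      · exact Or.inr fun q hq => h q (by simp [hq])
    cases dE
    · have hpE : ¬ p.2 = a := by
        rcases hE with h | h; · simp at h
        · exact h p (by simp)
      cases dS
      · have hpS : ¬ p.1 = b := by
          rcases hS with h | h; · simp at h
          · exact h p (by simp)
        simp [fep_go, hpE, hpS, ih false false hErest hSrest]
      · simp [fep_go, hpE, ih false true hErest hSrest]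
    · cases dS
      · have hpS : ¬ p.1 = b := by
          rcases hS with h | h; · simp at h
          · exact h p (by simp)
        simp [fep_go, hpS, ih true false hErest hSrest]
      · simp [fep_go, ih true true hErest hSrest]

-- after the end-rewrite (dE = true), with both partners present, the loop just drops the
-- first start-match
theorem fep_go_drop (a b : Int) (sv ev : Int × Int) :
    ∀ (l : List (Int × Int)),
      fep_go a b (some sv) (some ev) true false l =
        (match l.findIdx? (fun p => p.1 == b) with
         | some si => l.eraseIdx si
         | none => l) := by
  intro l
  induction l with
  | nil => rfl
  | cons p rest ih =>
    by_cases h : p.1 = b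
    · simp [fep_go, h, List.findIdx?_cons,
        fep_go_id a b (some sv) (some ev) rest true true (Or.inl rfl) (Or.inl rfl)]
    · cases hfi : rest.findIdx? (fun p => p.1 == b) <;>
        simp [fep_go, h, List.findIdx?_cons, ih, hfi]

-- after the start-match has been consumed (dS = true), the loop just rewrites the first
-- end-match to run to sv's end
theorem fep_go_glue (a b : Int) (sv : Int × Int) (ev? : Option (Int × Int)) :
    ∀ (l : List (Int × Int)),
      fep_go a b (some sv) ev? false true l =
        (match l.findIdx? (fun p => p.2 == a) with
         | some ei => l.set ei ((l.getD ei (0, 0)).1, sv.2)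
         | none => l) := by
  intro l
  induction l with
  | nil => rfl
  | cons p rest ih =>
    by_cases h : p.2 = a
    · simp [fep_go, h, List.findIdx?_cons,
        fep_go_id a b (some sv) ev? rest true true (Or.inl rfl) (Or.inl rfl), List.getD]
    · cases hfi : rest.findIdx? (fun p => p.2 == a) <;>
        simp [fep_go, h, List.findIdx?_cons, ih, hfi, List.getD]

-- only-start case: no path ends at a, so the loop rewrites the first start-match backward
theorem fep_go_start (a b : Int) (sv : Int × Int) :
    ∀ (l : List (Int × Int)) (dE : Bool), (∀ p ∈ l, ¬ p.2 = a) →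
      fep_go a b (some sv) none dE false l =
        (match l.findIdx? (fun p => p.1 == b) with
         | some si => l.set si (a, (l.getD si (0, 0)).2)
         | none => l) := by
  intro l
  induction l with
  | nil => intro _ _; rfl
  | cons p rest ih =>
    intro dE hA
    have hp : ¬ p.2 = a := hA p (by simp)
    have hrest : ∀ q ∈ rest, ¬ q.2 = a := fun q hq => hA q (by simp [hq])
    by_cases h : p.1 = b
    · simp [fep_go, h, hp, List.findIdx?_cons,
        fep_go_id a b (some sv) none rest dE true (Or.inr hrest) (Or.inl rfl), List.getD]
    · cases hfi : rest.findIdx? (fun p => p.1 == b) <;>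
        simp [fep_go, h, hp, List.findIdx?_cons, ih dE hrest, hfi, List.getD]

-- only-end case: no path starts at b, so the loop rewrites the first end-match forward
theorem fep_go_end (a b : Int) (ev? : Option (Int × Int)) :
    ∀ (l : List (Int × Int)) (dS : Bool), (∀ p ∈ l, ¬ p.1 = b) →
      fep_go a b none ev? false dS l =
        (match l.findIdx? (fun p => p.2 == a) with
         | some ei => l.set ei ((l.getD ei (0, 0)).1, b)
         | none => l) := by
  intro l
  induction l with
  | nil => intro _ _; rfl
  | cons p rest ih =>
    intro dS hB
    have hp : ¬ p.1 = b := hB p (by simp)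
    have hrest : ∀ q ∈ rest, ¬ q.1 = b := fun q hq => hB q (by simp [hq])
    by_cases h : p.2 = a
    · simp [fep_go, h, hp, List.findIdx?_cons,
        fep_go_id a b none ev? rest true dS (Or.inl rfl) (Or.inr hrest), List.getD]
    · cases hfi : rest.findIdx? (fun p => p.2 == a) <;>
        simp [fep_go, h, hp, List.findIdx?_cons, ih dS hrest, hfi, List.getD]

-- both-found case: the loop performs exactly A's set-then-delete surgery
theorem fep_go_both (a b : Int) (ev : Int × Int) :
    ∀ (l : List (Int × Int)) (sv : Int × Int) (si ei : Nat),
      l.find? (fun p => p.1 == b) = some sv →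
      l.findIdx? (fun p => p.1 == b) = some si →
      l.findIdx? (fun p => p.2 == a) = some ei →
      fep_go a b (some sv) (some ev) false false l =
        (l.set ei ((l.getD ei (0, 0)).1, (l.getD si (0, 0)).2)).eraseIdx si := by
  intro l
  induction l with
  | nil => intro sv si ei h _ _; simp at h
  | cons p rest ih =>
    intro sv si ei hsv hsi hei
    by_cases hA : p.2 = a
    · by_cases hB : p.1 = b
      · -- p is both partners: dropped; ei = si = 0
        have hsi0 : si = 0 := by simp [List.findIdx?_cons, hB] at hsi; omega
        have hei0 : ei = 0 := by simp [List.findIdx?_cons, hA] at hei; omega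
        subst hsi0; subst hei0
        simp [fep_go, hA, hB,
          fep_go_id a b (some sv) (some ev) rest true true (Or.inl rfl) (Or.inl rfl)]
      · -- end-match at the head; start-match strictly later
        have hei0 : ei = 0 := by simp [List.findIdx?_cons, hA] at hei; omega
        subst hei0
        obtain ⟨si', hsi', rfl⟩ : ∃ si', rest.findIdx? (fun p => p.1 == b) = some si' ∧ si = si' + 1 := by
          simp [List.findIdx?_cons, hB] at hsi
          rcases hsi with ⟨k, hk, rfl⟩; exact ⟨k, hk, rfl⟩
        have hsv' : rest.find? (fun p => p.1 == b) = some sv := by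
          simpa [List.find?_cons, hB] using hsv
        obtain ⟨v, hv1, hv2⟩ := find?_at_findIdx? (fun p => p.1 == b) rest si' hsi'
        have hvv : v = sv := by rw [hv1] at hsv'; injection hsv'
        have hv2' : rest[si']? = some sv := by rw [← hvv]; exact hv2
        simp [fep_go, hA, hB, fep_go_drop a b sv ev rest, hsi', List.getD, hv2']
    · by_cases hB : p.1 = b
      · -- start-match at the head: dropped here; the glue happens at the later end-match
        have hsi0 : si = 0 := by simp [List.findIdx?_cons, hB] at hsi; omega
        subst hsi0
        have hsvp : sv = p := by simp [List.find?_cons, hB] at hsv; exact hsv.symm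
        subst hsvp
        obtain ⟨ei', hei', rfl⟩ : ∃ ei', rest.findIdx? (fun p => p.2 == a) = some ei' ∧ ei = ei' + 1 := by
          simp [List.findIdx?_cons, hA] at hei
          rcases hei with ⟨k, hk, rfl⟩; exact ⟨k, hk, rfl⟩
        simp [fep_go, hA, hB, fep_go_glue a b sv (some ev) rest, hei', List.getD]
      · -- neither: keep p and recurse
        obtain ⟨si', hsi', rfl⟩ : ∃ si', rest.findIdx? (fun p => p.1 == b) = some si' ∧ si = si' + 1 := by
          simp [List.findIdx?_cons, hB] at hsi
          rcases hsi with ⟨k, hk, rfl⟩; exact ⟨k, hk, rfl⟩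
        obtain ⟨ei', hei', rfl⟩ : ∃ ei', rest.findIdx? (fun p => p.2 == a) = some ei' ∧ ei = ei' + 1 := by
          simp [List.findIdx?_cons, hA] at hei
          rcases hei with ⟨k, hk, rfl⟩; exact ⟨k, hk, rfl⟩
        have hsv' : rest.find? (fun p => p.1 == b) = some sv := by
          simpa [List.find?_cons, hB] using hsv
        simp [fep_go, hA, hB, ih sv si' ei' hsv' hsi' hei', List.getD]

-- ===== VERDICT (by name: the statement is the Claim_ definition above) =====
theorem find_existing_paths_spec : Claim_equal_find_existing_paths := by
  intro np ps _
  unfold Spec_find_existing_paths find_existing_paths find_existing_paths_alt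
  rcases hS : ps.findIdx? (fun p => p.1 == np.2) with _ | si <;>
    rcases hE : ps.findIdx? (fun p => p.2 == np.1) with _ | ei
  · -- no match at all: append the new segment
    have hfS := find?_none_of_findIdx?_none (fun p => p.1 == np.2) ps hS
    have hfE := find?_none_of_findIdx?_none (fun p => p.2 == np.1) ps hE
    simp [mem_fst_iff, mem_snd_iff, hS, hE, hfS, hfE,
      fep_go_id np.1 np.2 none none ps false false
        (Or.inr (no_end_of_none np.1 ps hE)) (Or.inr (no_start_of_none np.2 ps hS))]
  · -- only an end-match: extend it forward
    have hfS := find?_none_of_findIdx?_none (fun p => p.1 == np.2) ps hS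
    obtain ⟨ev, hfE, _⟩ := find?_at_findIdx? (fun p => p.2 == np.1) ps ei hE
    simp [mem_fst_iff, mem_snd_iff, hS, hE, hfS, hfE, index?_snd, idxOf?_snd, idxOf?_fst, List.getD,
      getElem?_map_fst, fep_go_end np.1 np.2 (some ev) ps false (no_start_of_none np.2 ps hS)]
  · -- only a start-match: extend it backward
    have hfE := find?_none_of_findIdx?_none (fun p => p.2 == np.1) ps hE
    obtain ⟨sv, hfS, _⟩ := find?_at_findIdx? (fun p => p.1 == np.2) ps si hS
    simp [mem_fst_iff, mem_snd_iff, hS, hE, hfS, hfE, index?_fst, idxOf?_snd, idxOf?_fst, List.getD,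
      getElem?_map_snd, fep_go_start np.1 np.2 sv ps false (no_end_of_none np.1 ps hE)]
  · -- both found: glue the two paths
    obtain ⟨sv, hfS, _⟩ := find?_at_findIdx? (fun p => p.1 == np.2) ps si hS
    obtain ⟨ev, hfE, _⟩ := find?_at_findIdx? (fun p => p.2 == np.1) ps ei hE
    simp [mem_fst_iff, mem_snd_iff, hS, hE, hfS, hfE, index?_fst, index?_snd, idxOf?_snd, idxOf?_fst, List.getD,
      fep_go_both np.1 np.2 ev ps sv si ei hfS hS hE]
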